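-- pv_equiv track=rewrite | github.com/savelja-s/scan_house | src/commands/predict_trees.py | find_feature_column
-- ===== SOURCE A (Python) =====
-- def find_feature_column(target, columns):
--     target_norm = target.strip().lower()
--     # Точний збіг
--     for c in columns:
--         if c.strip().lower() == target_norm:
--             return c
--     # Спец. для HAG
--     if target_norm in {"hag", "hag_nn", "heightaboveground"}:
--         for c in columns:
--             normc = c.strip().lower()
--             if normc.startswith("hag") or "heightaboveground" in normc:
--                 return c
--     # Частковий збіг
--     for c in columns:
--         if target_norm in c.strip().lower():
--             return c
--     raise Exception(f"Поле '{target}' відсутнє у даних (маємо {list(columns)})")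
-- ===== SOURCE B (Python) =====
-- def find_feature_column(target, columns):
--     target_norm = target.strip().lower()
--     is_hag = target_norm in {"hag", "hag_nn", "heightaboveground"}
--     exact = hag = partial = None
--     for c in columns:
--         n = c.strip().lower()
--         if exact is None and n == target_norm:
--             exact = c
--         if hag is None and (n.startswith("hag") or "heightaboveground" in n):
--             hag = c
--         if partial is None and target_norm in n:
--             partial = c
--     if exact is not None:
--         return exact
--     if is_hag and hag is not None:
--         return hag
--     if partial is not None:
--         return partial
--     raise Exception(f"Поле '{target}' відсутнє у даних (маємо {list(columns)})")
-- ===== Notes on version B (the rewrite author's own statement) =====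
-- stated objective: alternative
-- what changed: B normalizes each column once in a single pass that records the first exact, first HAG-style and first partial match in three slots, choosing among them afterwards, instead of A's three separate scans over the columns each re-normalizing every column.
import Mathlib
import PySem

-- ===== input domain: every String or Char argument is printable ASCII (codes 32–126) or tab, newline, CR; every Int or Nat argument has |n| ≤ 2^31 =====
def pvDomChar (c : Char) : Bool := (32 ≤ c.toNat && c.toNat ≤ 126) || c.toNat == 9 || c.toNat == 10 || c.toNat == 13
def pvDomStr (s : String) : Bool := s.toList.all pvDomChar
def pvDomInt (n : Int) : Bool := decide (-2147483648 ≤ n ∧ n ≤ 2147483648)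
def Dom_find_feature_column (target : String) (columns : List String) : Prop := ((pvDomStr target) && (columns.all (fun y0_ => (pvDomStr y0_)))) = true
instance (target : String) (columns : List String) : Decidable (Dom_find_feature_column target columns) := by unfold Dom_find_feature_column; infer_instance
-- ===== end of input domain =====

-- B replaces A's three scans (each re-normalizing every column) by one pass that records the
-- first exact / first HAG-style / first partial match, choosing among them afterwards (objective: alternative).

-- c.strip().lower(), used by both programs
def pvNorm (c : String) : String := PySem.Str.lower (PySem.Str.strip c)

-- ===== PORT A =====
-- first loop: exact match
def pvLoopExact (tn : String) : List String → Option String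
  | [] => none
  | c :: rest => if pvNorm c == tn then some c else pvLoopExact tn rest

-- second loop: HAG-style match
def pvLoopHag : List String → Option String
  | [] => none
  | c :: rest =>
    let normc := pvNorm c
    if PySem.Str.startswith normc "hag" || PySem.Str.isIn "heightaboveground" normc then some c
    else pvLoopHag rest

-- third loop: partial match
def pvLoopPartial (tn : String) : List String → Option String
  | [] => none
  | c :: rest => if PySem.Str.isIn tn (pvNorm c) then some c else pvLoopPartial tn rest

def find_feature_column (target : String) (columns : List String) : String :=
  let target_norm := pvNorm target
  match pvLoopExact target_norm columns with
  | some c => c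
  | none =>
    match (if target_norm == "hag" || target_norm == "hag_nn" || target_norm == "heightaboveground"
           then pvLoopHag columns else none) with
    | some c => c
    | none =>
      match pvLoopPartial target_norm columns with
      | some c => c
      | none => ""  -- Python raises here; excluded by Pre_

-- ===== PORT B =====
-- one fold step updating the three first-match slots (exact, hag, partial)
def pvStep (tn : String) (st : Option String × Option String × Option String) (c : String) :
    Option String × Option String × Option String :=
  let n := pvNorm c
  (if st.1.isNone && (n == tn) then some c else st.1,
   if st.2.1.isNone && (PySem.Str.startswith n "hag" || PySem.Str.isIn "heightaboveground" n) then some c else st.2.1,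
   if st.2.2.isNone && PySem.Str.isIn tn n then some c else st.2.2)

def find_feature_column_alt (target : String) (columns : List String) : String :=
  let tn := pvNorm target
  let is_hag := tn == "hag" || tn == "hag_nn" || tn == "heightaboveground"
  let st := columns.foldl (pvStep tn) (none, none, none)
  match st.1 with
  | some c => c
  | none =>
    match (if is_hag then st.2.1 else none) with
    | some c => c
    | none =>
      match st.2.2 with
      | some c => c
      | none => ""  -- Python raises here; excluded by Pre_

-- ===== PRECONDITION & SPEC =====
-- Pre_ excludes exactly the inputs on which Python A raises (no exact, HAG-style or partial match);
-- both ports return "" there and Python B raises the same Exception.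
def Pre_find_feature_column (target : String) (columns : List String) : Prop :=
  (columns.any (fun c => PySem.Str.isIn (pvNorm target) (pvNorm c)) ||
   ((pvNorm target == "hag" || pvNorm target == "hag_nn" || pvNorm target == "heightaboveground") &&
    columns.any (fun c => PySem.Str.startswith (pvNorm c) "hag" || PySem.Str.isIn "heightaboveground" (pvNorm c)))) = true
instance (target : String) (columns : List String) : Decidable (Pre_find_feature_column target columns) := by unfold Pre_find_feature_column; infer_instance

def pvWitness_find_feature_column : String × List String := ("HAG ", ["x", "hag_nn"])

def Spec_find_feature_column (target : String) (columns : List String) (out : String) : Prop := out = find_feature_column_alt target columns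
instance (target : String) (columns : List String) (out : String) : Decidable (Spec_find_feature_column target columns out) := by unfold Spec_find_feature_column; infer_instance

-- ===== CLAIM (what is proved, stated in full; the proofs are below) =====
def Claim_equal_find_feature_column : Prop := ∀ (target : String) (columns : List String), Dom_find_feature_column target columns → Pre_find_feature_column target columns → Spec_find_feature_column target columns (find_feature_column target columns)

-- ===== LEMMAS AND PROOFS =====

-- B's single fold computes the three first matches A's three loops compute
theorem pvFold_eq (tn : String) (l : List String) (e h p : Option String) :
    l.foldl (pvStep tn) (e, h, p) =
      (e.orElse (fun _ => pvLoopExact tn l),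
       h.orElse (fun _ => pvLoopHag l),
       p.orElse (fun _ => pvLoopPartial tn l)) := by
  induction l generalizing e h p with
  | nil => cases e <;> cases h <;> cases p <;> simp [Option.orElse, pvLoopExact, pvLoopHag, pvLoopPartial]
  | cons c rest ih =>
    simp only [List.foldl_cons, pvStep, pvLoopExact, pvLoopHag, pvLoopPartial]
    rw [ih]
    cases e <;> cases h <;> cases p <;>
      simp [Option.orElse] <;> split_ifs <;> simp_all [Option.orElse]

theorem find_feature_column_eq (target : String) (columns : List String) :
    find_feature_column target columns = find_feature_column_alt target columns := by
  simp only [find_feature_column, find_feature_column_alt, pvFold_eq]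
  cases pvLoopExact (pvNorm target) columns <;>
    cases pvLoopHag columns <;>
    cases pvLoopPartial (pvNorm target) columns <;>
    simp [Option.orElse]

-- ===== VERDICT (by name: the statement is the Claim_ definition above) =====
theorem find_feature_column_spec : Claim_equal_find_feature_column := by
  intro target columns _ _
  unfold Spec_find_feature_column
  exact find_feature_column_eq target columns
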